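-- pv_equiv track=rewrite | github.com/timothyylim/victorious_secret | Headless_Client/runAnalysis.py | unitsOverTime
-- ===== SOURCE A (Python) =====
-- def unitsOverTime(unitInformation, team):
--     unitsOverTime = []
--     for subList in unitInformation:
--         if team == 'ZOMBIE':
--             unitDictionary = {'STANDARDZOMBIE':[],'RANGEDZOMBIE':[],'FASTZOMBIE':[],'BIGZOMBIE':[]}
--             unitCount = {'STANDARDZOMBIE':0,'RANGEDZOMBIE':0,'FASTZOMBIE':0,'BIGZOMBIE':0}
--         else:
--             unitDictionary = {'SOLDIER':[],'GUARD':[],'ARCHON':[],'SCOUT':[],'VIPER':[],'TURRET':[],'TTM':[]}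
--             unitCount = {'SOLDIER':0,'GUARD':0,'ARCHON':0,'SCOUT':0,'VIPER':0,'TURRET':0,'TTM':0}
--         for aRound in subList:
--             for ID in aRound:
--                 unitType = aRound[ID]['type']
--                 unitTeam = aRound[ID]['team']
--                 if unitTeam==team and unitType in unitDictionary.keys():
--                     unitCount[unitType] += 1
--             for key in unitDictionary:
--                 unitDictionary[key].append(unitCount[key])
--                 unitCount[key] = 0
--         unitsOverTime.append(unitDictionary)
--     return unitsOverTime
-- ===== SOURCE B (Python) =====
-- def unitsOverTime(unitInformation, team):
--     if team == 'ZOMBIE':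
--         keys = ['STANDARDZOMBIE', 'RANGEDZOMBIE', 'FASTZOMBIE', 'BIGZOMBIE']
--     else:
--         keys = ['SOLDIER', 'GUARD', 'ARCHON', 'SCOUT', 'VIPER', 'TURRET', 'TTM']
--     result = []
--     for subList in unitInformation:
--         # phase 1: one fresh counter per round
--         perRound = []
--         for aRound in subList:
--             counts = {}
--             for ID in aRound:
--                 unitType = aRound[ID]['type']
--                 unitTeam = aRound[ID]['team']
--                 if unitTeam == team and unitType in keys:
--                     counts[unitType] = counts.get(unitType, 0) + 1
--             perRound.append(counts)
--         # phase 2: transpose the per-round counters into per-type time series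
--         result.append({key: [c.get(key, 0) for c in perRound] for key in keys})
--     return result
-- ===== Notes on version B (the rewrite author's own statement) =====
-- stated objective: simpler
-- what changed: A threads a mutable running counter that is accumulated, appended and reset in place across rounds; B is two-phase: it builds one fresh counter per round, then transposes the per-round counters into the fixed per-type time series.
import Mathlib
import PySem

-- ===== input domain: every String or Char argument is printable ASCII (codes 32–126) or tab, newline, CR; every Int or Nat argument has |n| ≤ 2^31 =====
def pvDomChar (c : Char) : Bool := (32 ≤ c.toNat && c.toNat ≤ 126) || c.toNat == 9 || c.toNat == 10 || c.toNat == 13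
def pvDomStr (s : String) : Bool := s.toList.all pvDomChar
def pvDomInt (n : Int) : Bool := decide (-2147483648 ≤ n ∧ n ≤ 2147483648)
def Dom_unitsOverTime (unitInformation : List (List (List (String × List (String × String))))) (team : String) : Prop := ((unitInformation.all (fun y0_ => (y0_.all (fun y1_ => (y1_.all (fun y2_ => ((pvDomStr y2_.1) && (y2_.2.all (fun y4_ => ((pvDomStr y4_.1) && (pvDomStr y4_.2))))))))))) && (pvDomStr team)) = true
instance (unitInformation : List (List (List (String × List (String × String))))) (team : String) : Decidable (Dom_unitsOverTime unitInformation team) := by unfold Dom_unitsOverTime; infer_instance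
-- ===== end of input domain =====

-- B replaces A's accumulate-append-reset running counter with a two-phase count-per-round-then-transpose
-- structure (objective: simpler); return values proved equal on Pre_.

-- ===== PORT A =====
-- inner loop 'for ID in aRound: …' (unitCount[unitType] += 1 on a key guaranteed present)
def pvTallyA (team : String) (udKeys : List String) (aRound : List (String × List (String × String))) (uc : PySem.Dict String Int) : PySem.Dict String Int :=
  aRound.foldl (fun uc pr =>
    let entry := (aRound.lookup pr.1).getD []          -- aRound[ID]: ID iterates aRound's keys, first match
    let unitType := (entry.lookup "type").getD ""      -- aRound[ID]['type']; missing key = KeyError, outside Pre_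
    let unitTeam := (entry.lookup "team").getD ""      -- aRound[ID]['team']; missing key = KeyError, outside Pre_
    if unitTeam == team && udKeys.contains unitType then
      uc.modify unitType 0 (· + 1)
    else uc) uc

-- one 'for aRound in subList' iteration: tally, then 'for key in unitDictionary: append & reset'
def pvRoundA (team : String) (st : PySem.Dict String (List Int) × PySem.Dict String Int) (aRound : List (String × List (String × String))) : PySem.Dict String (List Int) × PySem.Dict String Int :=
  let uc := pvTallyA team (PySem.Dict.keys st.1) aRound st.2
  (PySem.Dict.keys st.1).foldl (fun st key =>
      (st.1.modify key [] (fun l => l ++ [st.2.getD key 0]),   -- unitDictionary[key].append(unitCount[key])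
       st.2.insert key 0))                                      -- unitCount[key] = 0
    (st.1, uc)

def pvSubA (team : String) (subList : List (List (String × List (String × String)))) : List (String × List Int) :=
  let ud0 : PySem.Dict String (List Int) :=
    if team == "ZOMBIE" then
      PySem.Dict.mk [("STANDARDZOMBIE", []), ("RANGEDZOMBIE", []), ("FASTZOMBIE", []), ("BIGZOMBIE", [])]
    else
      PySem.Dict.mk [("SOLDIER", []), ("GUARD", []), ("ARCHON", []), ("SCOUT", []), ("VIPER", []), ("TURRET", []), ("TTM", [])]
  let uc0 : PySem.Dict String Int :=
    if team == "ZOMBIE" then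
      PySem.Dict.mk [("STANDARDZOMBIE", 0), ("RANGEDZOMBIE", 0), ("FASTZOMBIE", 0), ("BIGZOMBIE", 0)]
    else
      PySem.Dict.mk [("SOLDIER", 0), ("GUARD", 0), ("ARCHON", 0), ("SCOUT", 0), ("VIPER", 0), ("TURRET", 0), ("TTM", 0)]
  (subList.foldl (pvRoundA team) (ud0, uc0)).1.items

def unitsOverTime (unitInformation : List (List (List (String × List (String × String))))) (team : String) : List (List (String × List Int)) :=
  unitInformation.foldl (fun uot subList => uot ++ [pvSubA team subList]) []

-- ===== PORT B =====
def pvKeysB (team : String) : List String :=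
  if team == "ZOMBIE" then ["STANDARDZOMBIE", "RANGEDZOMBIE", "FASTZOMBIE", "BIGZOMBIE"]
  else ["SOLDIER", "GUARD", "ARCHON", "SCOUT", "VIPER", "TURRET", "TTM"]

-- phase 1: a fresh counter for one round ('counts = {}; counts[t] = counts.get(t, 0) + 1')
def pvTallyB (team : String) (keys : List String) (aRound : List (String × List (String × String))) : PySem.Dict String Int :=
  aRound.foldl (fun counts pr =>
    let entry := (aRound.lookup pr.1).getD []
    let unitType := (entry.lookup "type").getD ""
    let unitTeam := (entry.lookup "team").getD ""
    if unitTeam == team && keys.contains unitType then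
      counts.insert unitType (counts.getD unitType 0 + 1)
    else counts) PySem.Dict.empty

def unitsOverTime_alt (unitInformation : List (List (List (String × List (String × String))))) (team : String) : List (List (String × List Int)) :=
  unitInformation.map (fun subList =>
    let perRound := subList.map (pvTallyB team (pvKeysB team))
    -- phase 2: transpose — one time series per fixed type key
    (pvKeysB team).map (fun k => (k, perRound.map (fun c => c.getD k 0))))

-- ===== PRECONDITION & SPEC =====
-- Pre_ excludes (a) rounds whose unit dicts lack a "type" or "team" key, where A raises KeyError, and
-- (b) association lists with duplicate keys in a round or a unit dict, which do not denote a Python dict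
-- (Python collapses duplicates, so A's behaviour on the list form is an artefact of the encoding).
def Pre_unitsOverTime (unitInformation : List (List (List (String × List (String × String))))) (team : String) : Prop :=
  ∀ subList ∈ unitInformation, ∀ aRound ∈ subList,
    (aRound.map Prod.fst).Nodup ∧
    ∀ e ∈ aRound, (e.2.map Prod.fst).Nodup ∧ "type" ∈ e.2.map Prod.fst ∧ "team" ∈ e.2.map Prod.fst
instance (unitInformation : List (List (List (String × List (String × String))))) (team : String) : Decidable (Pre_unitsOverTime unitInformation team) := by unfold Pre_unitsOverTime; infer_instance

def pvWitness_unitsOverTime : (List (List (List (String × List (String × String))))) × String :=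
  ([[[("u1", [("type", "SOLDIER"), ("team", "RED")]), ("u2", [("type", "GUARD"), ("team", "BLUE")])]]], "RED")

def Spec_unitsOverTime (unitInformation : List (List (List (String × List (String × String))))) (team : String) (out : List (List (String × List Int))) : Prop := out = unitsOverTime_alt unitInformation team
instance (unitInformation : List (List (List (String × List (String × String))))) (team : String) (out : List (List (String × List Int))) : Decidable (Spec_unitsOverTime unitInformation team out) := by unfold Spec_unitsOverTime; infer_instance

-- ===== CLAIM (what is proved, stated in full; the proofs are below) =====
def Claim_equal_unitsOverTime : Prop := ∀ (unitInformation : List (List (List (String × List (String × String))))) (team : String), Dom_unitsOverTime unitInformation team → Pre_unitsOverTime unitInformation team → Spec_unitsOverTime unitInformation team (unitsOverTime unitInformation team)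

-- ===== LEMMAS AND PROOFS =====

-- a guarded bump-loop is a plain bump-loop over the selected keys
theorem pv_foldl_if_bump {α β : Type} (l : List α) (p : α → Bool) (g : α → String) (bump : β → String → β) (d : β) :
    l.foldl (fun d a => if p a then bump d (g a) else d) d = ((l.filter p).map g).foldl bump d := by
  induction l generalizing d with
  | nil => rfl
  | cons a l ih =>
    by_cases h : p a = true <;> simp [h, ih]

-- the keys an entry of aRound can bump (those passing the guard)
def pvMatched (team : String) (K : List String) (aRound : List (String × List (String × String))) : List String :=
  (aRound.filter (fun pr =>
      let entry := (aRound.lookup pr.1).getD []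
      ((entry.lookup "team").getD "" == team) && K.contains ((entry.lookup "type").getD ""))).map
    (fun pr => (((aRound.lookup pr.1).getD []).lookup "type").getD "")

theorem pvMatched_mem {team : String} {K : List String} {aRound : List (String × List (String × String))} {w : String} (hw : w ∈ pvMatched team K aRound) : w ∈ K := by
  unfold pvMatched at hw
  rcases List.mem_map.1 hw with ⟨pr, hpr, rfl⟩
  rcases List.mem_filter.1 hpr with ⟨-, hcond⟩
  simp only [Bool.and_eq_true] at hcond
  have := hcond.2
  simpa using this

theorem pvTallyA_eq (team : String) (K : List String) (aRound : List (String × List (String × String))) (uc : PySem.Dict String Int) :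
    pvTallyA team K aRound uc = (pvMatched team K aRound).foldl (fun d w => d.modify w 0 (· + 1)) uc := by
  unfold pvTallyA pvMatched
  exact pv_foldl_if_bump aRound
    (fun pr => ((((aRound.lookup pr.1).getD []).lookup "team").getD "" == team) && K.contains ((((aRound.lookup pr.1).getD []).lookup "type").getD ""))
    (fun pr => (((aRound.lookup pr.1).getD []).lookup "type").getD "")
    (fun d w => d.modify w 0 (· + 1)) uc

theorem pvTallyB_eq (team : String) (K : List String) (aRound : List (String × List (String × String))) :
    pvTallyB team K aRound = (pvMatched team K aRound).foldl (fun d w => d.insert w (d.getD w 0 + 1)) PySem.Dict.empty := by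
  unfold pvTallyB pvMatched
  exact pv_foldl_if_bump aRound
    (fun pr => ((((aRound.lookup pr.1).getD []).lookup "team").getD "" == team) && K.contains ((((aRound.lookup pr.1).getD []).lookup "type").getD ""))
    (fun pr => (((aRound.lookup pr.1).getD []).lookup "type").getD "")
    (fun d w => d.insert w (d.getD w 0 + 1)) (PySem.Dict.empty : PySem.Dict String Int)

theorem pvTallyA_getD (team : String) (K : List String) (aRound : List (String × List (String × String))) (uc : PySem.Dict String Int) (k : String) :
    (pvTallyA team K aRound uc).getD k 0 = uc.getD k 0 + (pvMatched team K aRound).count k := by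
  rw [pvTallyA_eq]
  exact PySem.Dict.getD_foldl_modify_add_one (pvMatched team K aRound) uc k

theorem pvTallyB_getD (team : String) (K : List String) (aRound : List (String × List (String × String))) (k : String) :
    (pvTallyB team K aRound).getD k 0 = (pvMatched team K aRound).count k := by
  rw [pvTallyB_eq]
  have := PySem.Dict.getD_foldl_insert_add_one (pvMatched team K aRound) (PySem.Dict.empty (κ := String) (ν := Int)) k
  simpa using this

theorem pvTallyA_keys (team : String) (K : List String) (aRound : List (String × List (String × String))) (uc : PySem.Dict String Int) (hK : uc.keys = K) :
    (pvTallyA team K aRound uc).keys = K := by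
  rw [pvTallyA_eq, PySem.Dict.keys_foldl_modify, hK, PySem.Set.update_eq_append_filter]
  have hfil : List.filter (fun y => !(PySem.Set.contains K y)) (PySem.Set.ofList (pvMatched team K aRound)) = [] := by
    apply List.filter_eq_nil_iff.2
    intro y hy
    have hyK : y ∈ K := pvMatched_mem ((PySem.Set.mem_ofList _ _).1 hy)
    simp [hyK]
  rw [hfil]
  simp

-- the append-and-reset loop over the fixed key list
theorem pvResetLoop (todo : List String) (ud : PySem.Dict String (List Int)) (uc : PySem.Dict String Int)
    (hnd : todo.Nodup) (hud : ∀ k ∈ todo, ud.contains k = true) (huc : ∀ k ∈ todo, uc.contains k = true) :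
    let res := todo.foldl (fun st key => (st.1.modify key [] (fun l => l ++ [st.2.getD key 0]), st.2.insert key 0)) (ud, uc)
    res.1.keys = ud.keys ∧ res.2.keys = uc.keys ∧
    (∀ k, res.1.getD k [] = if k ∈ todo then ud.getD k [] ++ [uc.getD k 0] else ud.getD k []) ∧
    (∀ k, res.2.getD k 0 = if k ∈ todo then 0 else uc.getD k 0) := by
  induction todo generalizing ud uc with
  | nil => simp
  | cons k0 todo ih =>
    have hnd' := (List.nodup_cons.1 hnd).2
    have hk0 : k0 ∉ todo := (List.nodup_cons.1 hnd).1
    simp only [List.foldl_cons]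
    have hud0 := hud k0 (List.mem_cons_self ..)
    have huc0 := huc k0 (List.mem_cons_self ..)
    set ud1 := ud.modify k0 [] (fun l => l ++ [uc.getD k0 0]) with hud1
    set uc1 := uc.insert k0 0 with huc1
    have hud1keys : ud1.keys = ud.keys := by
      rw [hud1, PySem.Dict.keys_modify]
      exact PySem.Dict.keys_insert_of_contains _ _ hud0
    have huc1keys : uc1.keys = uc.keys := by
      rw [huc1]; exact PySem.Dict.keys_insert_of_contains _ _ huc0
    have hud1c : ∀ k ∈ todo, ud1.contains k = true := by
      intro k hk
      rw [PySem.Dict.contains_iff_mem_keys, hud1keys, ← PySem.Dict.contains_iff_mem_keys]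
      exact hud k (List.mem_cons_of_mem _ hk)
    have huc1c : ∀ k ∈ todo, uc1.contains k = true := by
      intro k hk
      rw [PySem.Dict.contains_iff_mem_keys, huc1keys, ← PySem.Dict.contains_iff_mem_keys]
      exact huc k (List.mem_cons_of_mem _ hk)
    obtain ⟨h1, h2, h3, h4⟩ := ih ud1 uc1 hnd' hud1c huc1c
    refine ⟨by rw [h1, hud1keys], by rw [h2, huc1keys], ?_, ?_⟩
    · intro k
      rw [h3 k]
      by_cases hk : k ∈ todo
      · have hne : k ≠ k0 := fun h => hk0 (h ▸ hk)
        simp [hk, hne, hud1, huc1, PySem.Dict.getD_modify_of_ne _ _ _ hne,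
          PySem.Dict.getD_insert_of_ne _ _ _ hne]
      · by_cases hk0' : k = k0
        · subst hk0'
          simp [hk, hud1, PySem.Dict.getD_modify_self]
        · simp [hk, hk0', hud1, PySem.Dict.getD_modify_of_ne _ _ _ hk0']
    · intro k
      rw [h4 k]
      by_cases hk : k ∈ todo
      · simp [hk]
      · by_cases hk0' : k = k0
        · subst hk0'
          simp [hk, huc1, PySem.Dict.getD_insert_self]
        · simp [hk, hk0', huc1, PySem.Dict.getD_insert_of_ne _ _ _ hk0']

-- one round of A, summarised against B's per-round counter
theorem pvRoundA_spec (team : String) (K : List String) (hnd : K.Nodup)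
    (ud : PySem.Dict String (List Int)) (uc : PySem.Dict String Int)
    (hudK : ud.keys = K) (hucK : uc.keys = K) (huc0 : ∀ k, uc.getD k 0 = 0)
    (aRound : List (String × List (String × String))) :
    (pvRoundA team (ud, uc) aRound).1.keys = K ∧
    (pvRoundA team (ud, uc) aRound).2.keys = K ∧
    (∀ k, (pvRoundA team (ud, uc) aRound).2.getD k 0 = 0) ∧
    (∀ k ∈ K, (pvRoundA team (ud, uc) aRound).1.getD k [] = ud.getD k [] ++ [(pvTallyB team K aRound).getD k 0]) := by
  unfold pvRoundA
  simp only [hudK]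
  set uc1 := pvTallyA team K aRound uc with huc1
  have huc1K : uc1.keys = K := pvTallyA_keys team K aRound uc hucK
  have huc1get : ∀ k, uc1.getD k 0 = (pvTallyB team K aRound).getD k 0 := by
    intro k
    rw [huc1, pvTallyA_getD, huc0, pvTallyB_getD]
    ring
  obtain ⟨h1, h2, h3, h4⟩ := pvResetLoop K ud uc1 hnd
    (fun k hk => by rw [PySem.Dict.contains_iff_mem_keys, hudK]; exact hk)
    (fun k hk => by rw [PySem.Dict.contains_iff_mem_keys, huc1K]; exact hk)
  refine ⟨by rw [h1, hudK], by rw [h2, huc1K], ?_, ?_⟩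
  · intro k
    rw [h4 k]
    by_cases hk : k ∈ K
    · simp [hk]
    · simp only [hk, if_false]
      rw [huc1, pvTallyA_getD, huc0]
      have : (pvMatched team K aRound).count k = 0 := by
        rw [List.count_eq_zero]
        exact fun hmem => hk (pvMatched_mem hmem)
      omega
  · intro k hk
    rw [h3 k]
    simp [hk, huc1get k]

-- the whole subList fold of A, against B's per-round counters
theorem pvSubFold (team : String) (K : List String) (hnd : K.Nodup)
    (subList : List (List (String × List (String × String)))) :
    ∀ (ud : PySem.Dict String (List Int)) (uc : PySem.Dict String Int),
    ud.keys = K → uc.keys = K → (∀ k, uc.getD k 0 = 0) →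
    (subList.foldl (pvRoundA team) (ud, uc)).1.keys = K ∧
    (∀ k ∈ K, (subList.foldl (pvRoundA team) (ud, uc)).1.getD k []
        = ud.getD k [] ++ subList.map (fun r => (pvTallyB team K r).getD k 0)) := by
  induction subList with
  | nil => intro ud uc hudK _ _; exact ⟨hudK, by simp⟩
  | cons r rest ih =>
    intro ud uc hudK hucK huc0
    obtain ⟨h1, h2, h3, h4⟩ := pvRoundA_spec team K hnd ud uc hudK hucK huc0 r
    simp only [List.foldl_cons]
    have hpair : pvRoundA team (ud, uc) r = ((pvRoundA team (ud, uc) r).1, (pvRoundA team (ud, uc) r).2) := rfl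
    rw [hpair]
    obtain ⟨g1, g2⟩ := ih (pvRoundA team (ud, uc) r).1 (pvRoundA team (ud, uc) r).2 h1 h2 h3
    refine ⟨g1, ?_⟩
    intro k hk
    rw [g2 k hk, h4 k hk]
    simp

-- per-subList equality of the two implementations
theorem pvSubA_items (team : String) (K : List String) (hnd : K.Nodup)
    (ud0 : PySem.Dict String (List Int)) (uc0 : PySem.Dict String Int)
    (hudK : ud0.keys = K) (hud0get : ∀ k ∈ K, ud0.getD k [] = [])
    (hucK : uc0.keys = K) (huc0 : ∀ k, uc0.getD k 0 = 0)
    (subList : List (List (String × List (String × String)))) :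
    (subList.foldl (pvRoundA team) (ud0, uc0)).1.items
      = K.map (fun k => (k, (subList.map (pvTallyB team K)).map (fun c => c.getD k 0))) := by
  obtain ⟨h1, h2⟩ := pvSubFold team K hnd subList ud0 uc0 hudK hucK huc0
  rw [PySem.Dict.items_eq_map_keys _ (by rw [h1]; exact hnd) [], h1]
  apply List.map_congr_left
  intro k hk
  rw [h2 k hk, hud0get k hk]
  simp

theorem pvSub_eq (team : String) (subList : List (List (String × List (String × String)))) :
    pvSubA team subList
      = (pvKeysB team).map (fun k => (k, (subList.map (pvTallyB team (pvKeysB team))).map (fun c => c.getD k 0))) := by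
  unfold pvSubA pvKeysB
  by_cases hz : (team == "ZOMBIE") = true
  · simp only [hz, if_true]
    apply pvSubA_items team _ (by decide) _ _ rfl (by decide) rfl
    intro k
    simp [PySem.Dict.getD_eq_get?_getD, PySem.Dict.get?_mk_cons]
    split_ifs <;> rfl
  · simp only [hz, if_false, Bool.false_eq_true]
    apply pvSubA_items team _ (by decide) _ _ rfl (by decide) rfl
    intro k
    simp [PySem.Dict.getD_eq_get?_getD, PySem.Dict.get?_mk_cons]
    split_ifs <;> rfl

-- ===== VERDICT (by name: the statement is the Claim_ definition above) =====
theorem unitsOverTime_spec : Claim_equal_unitsOverTime := by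
  intro ui team _dom _pre
  unfold Spec_unitsOverTime unitsOverTime unitsOverTime_alt
  rw [PySem.List.foldl_append_singleton_eq_map]
  exact List.map_congr_left (fun sub _ => pvSub_eq team sub)
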